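-- pv_equiv track=rewrite | github.com/hhawth/github-actions | match_outcome_ranker.py | create_ranking_categories
-- ===== SOURCE A (Python) =====
-- from typing import List, Dict
--
-- def create_ranking_categories(ranked_outcomes: List[Dict]) -> Dict:
--     """Categorize outcomes into different likelihood tiers"""
--
--     total = len(ranked_outcomes)
--
--     categories = {
--         'very_likely': [],      # Top 10%
--         'likely': [],           # 10-30%
--         'moderate': [],         # 30-60%
--         'unlikely': [],         # 60-85%
--         'very_unlikely': []     # Bottom 15%
--     }
--
--     for i, outcome in enumerate(ranked_outcomes):
--         percentile = (i / total) * 100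
--
--         if percentile <= 10:
--             categories['very_likely'].append(outcome)
--         elif percentile <= 30:
--             categories['likely'].append(outcome)
--         elif percentile <= 60:
--             categories['moderate'].append(outcome)
--         elif percentile <= 85:
--             categories['unlikely'].append(outcome)
--         else:
--             categories['very_unlikely'].append(outcome)
--
--     return categories
-- ===== SOURCE B (Python) =====
-- from typing import List, Dict
--
-- def create_ranking_categories(ranked_outcomes: List[Dict]) -> Dict:
--     """Categorize outcomes into likelihood tiers.
--
--     Position i (of total) falls in tier t iff i*100 <= t*total, so each tier
--     boundary is simply t*total//100 + 1; slice the list at those boundaries.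
--     """
--     total = len(ranked_outcomes)
--     b1, b2, b3, b4 = (t * total // 100 + 1 for t in (10, 30, 60, 85))
--     return {
--         'very_likely': ranked_outcomes[:b1],
--         'likely': ranked_outcomes[b1:b2],
--         'moderate': ranked_outcomes[b2:b3],
--         'unlikely': ranked_outcomes[b3:b4],
--         'very_unlikely': ranked_outcomes[b4:],
--     }
-- ===== Notes on version B (the rewrite author's own statement) =====
-- stated objective: alternative
-- what changed: Replaces the per-element if/elif dispatch loop with closed-form percentile boundary indices (t*total//100 + 1) and list slicing to build the five tiers.
import Mathlib
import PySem

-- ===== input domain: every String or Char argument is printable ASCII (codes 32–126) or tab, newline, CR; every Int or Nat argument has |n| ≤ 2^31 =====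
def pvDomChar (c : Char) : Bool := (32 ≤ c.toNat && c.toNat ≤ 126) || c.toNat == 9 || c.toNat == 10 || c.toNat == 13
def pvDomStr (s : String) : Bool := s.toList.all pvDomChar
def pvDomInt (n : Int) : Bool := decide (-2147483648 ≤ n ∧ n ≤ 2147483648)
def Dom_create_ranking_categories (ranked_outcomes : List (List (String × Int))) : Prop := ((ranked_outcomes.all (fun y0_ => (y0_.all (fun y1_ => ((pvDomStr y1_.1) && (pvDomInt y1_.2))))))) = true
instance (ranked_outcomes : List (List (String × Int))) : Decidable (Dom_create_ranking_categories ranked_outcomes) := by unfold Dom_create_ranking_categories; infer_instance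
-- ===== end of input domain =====

-- B buckets ranked outcomes by computing the four percentile boundary indices in closed form
-- (t*total//100 + 1) and slicing, instead of A's per-element if/elif dispatch loop
-- (objective: alternative decomposition, same cost).
-- Python's float comparison (i/total)*100 <= t is ported in A as the exact rational
-- comparison i*100 <= t*total, which agrees with the float for these thresholds.

-- ===== PORT A =====
-- the five buckets of A's `categories` dict, in insertion order
def pvStep (total : Nat)
    (s : List (List (String × Int)) × List (List (String × Int)) × List (List (String × Int)) ×
         List (List (String × Int)) × List (List (String × Int)))
    (p : Int × List (String × Int)) :
    List (List (String × Int)) × List (List (String × Int)) × List (List (String × Int)) ×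
    List (List (String × Int)) × List (List (String × Int)) :=
  if p.1 * 100 ≤ 10 * (total : Int) then (s.1 ++ [p.2], s.2.1, s.2.2.1, s.2.2.2.1, s.2.2.2.2)
  else if p.1 * 100 ≤ 30 * (total : Int) then (s.1, s.2.1 ++ [p.2], s.2.2.1, s.2.2.2.1, s.2.2.2.2)
  else if p.1 * 100 ≤ 60 * (total : Int) then (s.1, s.2.1, s.2.2.1 ++ [p.2], s.2.2.2.1, s.2.2.2.2)
  else if p.1 * 100 ≤ 85 * (total : Int) then (s.1, s.2.1, s.2.2.1, s.2.2.2.1 ++ [p.2], s.2.2.2.2)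
  else (s.1, s.2.1, s.2.2.1, s.2.2.2.1, s.2.2.2.2 ++ [p.2])

def create_ranking_categories (ranked_outcomes : List (List (String × Int))) : List (String × List (List (String × Int))) :=
  let total := ranked_outcomes.length
  let s := (PySem.List.enumerate ranked_outcomes 0).foldl (pvStep total) ([], [], [], [], [])
  [("very_likely", s.1), ("likely", s.2.1), ("moderate", s.2.2.1),
   ("unlikely", s.2.2.2.1), ("very_unlikely", s.2.2.2.2)]

-- ===== PORT B =====
-- boundary index of tier t: t * total // 100 + 1
def pvCut (total : Nat) (t : Nat) : Nat := t * total / 100 + 1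

def create_ranking_categories_alt (ranked_outcomes : List (List (String × Int))) : List (String × List (List (String × Int))) :=
  let total := ranked_outcomes.length
  let b1 := pvCut total 10
  let b2 := pvCut total 30
  let b3 := pvCut total 60
  let b4 := pvCut total 85
  [("very_likely", ranked_outcomes.take b1),
   ("likely", (ranked_outcomes.drop b1).take (b2 - b1)),
   ("moderate", (ranked_outcomes.drop b2).take (b3 - b2)),
   ("unlikely", (ranked_outcomes.drop b3).take (b4 - b3)),
   ("very_unlikely", ranked_outcomes.drop b4)]

-- ===== PRECONDITION & SPEC =====
def Spec_create_ranking_categories (ranked_outcomes : List (List (String × Int))) (out : List (String × List (List (String × Int)))) : Prop := out = create_ranking_categories_alt ranked_outcomes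
instance (ranked_outcomes : List (List (String × Int))) (out : List (String × List (List (String × Int)))) : Decidable (Spec_create_ranking_categories ranked_outcomes out) := by unfold Spec_create_ranking_categories; infer_instance

-- ===== CLAIM (what is proved, stated in full; the proofs are below) =====
def Claim_equal_create_ranking_categories : Prop := ∀ (ranked_outcomes : List (List (String × Int))), Dom_create_ranking_categories ranked_outcomes → Spec_create_ranking_categories ranked_outcomes (create_ranking_categories ranked_outcomes)

-- ===== LEMMAS AND PROOFS =====

theorem pv_take_cons_sub {α : Type} (x : α) (xs : List α) (a k : Nat) (h : k < a) :
    (x :: xs).take (a - k) = x :: xs.take (a - (k + 1)) := by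
  rw [show a - k = (a - (k + 1)) + 1 from by omega]; rfl

theorem pv_drop_cons_sub {α : Type} (x : α) (xs : List α) (a k : Nat) (h : k < a) :
    (x :: xs).drop (a - k) = xs.drop (a - (k + 1)) := by
  rw [show a - k = (a - (k + 1)) + 1 from by omega]; rfl

theorem pv_sub_zero_of_le (a k : Nat) (h : a ≤ k) : a - k = 0 := by omega

theorem pv_takedrop_cons {α : Type} (x : α) (xs : List α) (a b k : Nat) (hka : k < a) (hab : a ≤ b) :
    ((x :: xs).take (b - k)).drop (a - k) = (xs.take (b - (k + 1))).drop (a - (k + 1)) := by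
  rw [pv_take_cons_sub x xs b k (by omega), pv_drop_cons_sub x _ a k hka]

-- the fold over enumerate with nested interval conditions produces the slices
theorem pv_fold_spec (n b1 b2 b3 b4 : Nat)
    (h1 : ∀ k : Nat, ((k : Int) * 100 ≤ 10 * (n : Int)) ↔ k < b1)
    (h2 : ∀ k : Nat, ((k : Int) * 100 ≤ 30 * (n : Int)) ↔ k < b2)
    (h3 : ∀ k : Nat, ((k : Int) * 100 ≤ 60 * (n : Int)) ↔ k < b3)
    (h4 : ∀ k : Nat, ((k : Int) * 100 ≤ 85 * (n : Int)) ↔ k < b4)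
    (hb1 : b1 ≤ b2) (hb2 : b2 ≤ b3) (hb3 : b3 ≤ b4) :
    ∀ (xs : List (List (String × Int))) (k : Nat)
      (s1 s2 s3 s4 s5 : List (List (String × Int))),
      (PySem.List.enumerate xs (k : Int)).foldl (pvStep n) (s1, s2, s3, s4, s5) =
        (s1 ++ xs.take (b1 - k),
         s2 ++ (xs.take (b2 - k)).drop (b1 - k),
         s3 ++ (xs.take (b3 - k)).drop (b2 - k),
         s4 ++ (xs.take (b4 - k)).drop (b3 - k),
         s5 ++ xs.drop (b4 - k)) := by
  intro xs
  induction xs with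
  | nil => intro k s1 s2 s3 s4 s5; simp [PySem.List.enumerate_nil]
  | cons x xs ih =>
    intro k s1 s2 s3 s4 s5
    rw [PySem.List.enumerate_cons]
    have hcast : (k : Int) + 1 = ((k + 1 : Nat) : Int) := by push_cast; ring
    rw [List.foldl_cons, hcast]
    by_cases c1 : k < b1
    · have : pvStep n (s1, s2, s3, s4, s5) ((k : Int), x) =
          (s1 ++ [x], s2, s3, s4, s5) := by
        simp [pvStep, (h1 k).mpr c1]
      rw [this, ih]
      refine Prod.ext ?_ (Prod.ext ?_ (Prod.ext ?_ (Prod.ext ?_ ?_))) <;> simp only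
      · rw [pv_take_cons_sub x xs b1 k c1]; try simp
      · rw [pv_takedrop_cons x xs b1 b2 k (by omega) (by omega)]
      · rw [pv_takedrop_cons x xs b2 b3 k (by omega) (by omega)]
      · rw [pv_takedrop_cons x xs b3 b4 k (by omega) (by omega)]
      · rw [pv_drop_cons_sub x xs b4 k (by omega)]
    · by_cases c2 : k < b2
      · have : pvStep n (s1, s2, s3, s4, s5) ((k : Int), x) =
            (s1, s2 ++ [x], s3, s4, s5) := by
          simp [pvStep, (h2 k).mpr c2, show ¬ ((k:Int) * 100 ≤ 10 * n) from fun h => c1 ((h1 k).mp h)]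
        rw [this, ih]
        refine Prod.ext ?_ (Prod.ext ?_ (Prod.ext ?_ (Prod.ext ?_ ?_))) <;> simp only
        · rw [pv_sub_zero_of_le b1 k (by omega), pv_sub_zero_of_le b1 (k+1) (by omega)]; try simp
        · rw [pv_sub_zero_of_le b1 k (by omega), pv_sub_zero_of_le b1 (k+1) (by omega),
              pv_take_cons_sub x xs b2 k c2]; try simp
        · rw [pv_takedrop_cons x xs b2 b3 k (by omega) (by omega)]
        · rw [pv_takedrop_cons x xs b3 b4 k (by omega) (by omega)]
        · rw [pv_drop_cons_sub x xs b4 k (by omega)]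
      · by_cases c3 : k < b3
        · have : pvStep n (s1, s2, s3, s4, s5) ((k : Int), x) =
              (s1, s2, s3 ++ [x], s4, s5) := by
            simp [pvStep, (h3 k).mpr c3,
              show ¬ ((k:Int) * 100 ≤ 10 * n) from fun h => c1 ((h1 k).mp h),
              show ¬ ((k:Int) * 100 ≤ 30 * n) from fun h => c2 ((h2 k).mp h)]
          rw [this, ih]
          refine Prod.ext ?_ (Prod.ext ?_ (Prod.ext ?_ (Prod.ext ?_ ?_))) <;> simp only
          · rw [pv_sub_zero_of_le b1 k (by omega), pv_sub_zero_of_le b1 (k+1) (by omega)]; try simp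
          · rw [pv_sub_zero_of_le b2 k (by omega), pv_sub_zero_of_le b2 (k+1) (by omega),
                pv_sub_zero_of_le b1 k (by omega), pv_sub_zero_of_le b1 (k+1) (by omega)]; try simp
          · rw [pv_sub_zero_of_le b2 k (by omega), pv_sub_zero_of_le b2 (k+1) (by omega),
                pv_take_cons_sub x xs b3 k c3]; try simp
          · rw [pv_takedrop_cons x xs b3 b4 k (by omega) (by omega)]
          · rw [pv_drop_cons_sub x xs b4 k (by omega)]
        · by_cases c4 : k < b4
          · have : pvStep n (s1, s2, s3, s4, s5) ((k : Int), x) =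
                (s1, s2, s3, s4 ++ [x], s5) := by
              simp [pvStep, (h4 k).mpr c4,
                show ¬ ((k:Int) * 100 ≤ 10 * n) from fun h => c1 ((h1 k).mp h),
                show ¬ ((k:Int) * 100 ≤ 30 * n) from fun h => c2 ((h2 k).mp h),
                show ¬ ((k:Int) * 100 ≤ 60 * n) from fun h => c3 ((h3 k).mp h)]
            rw [this, ih]
            refine Prod.ext ?_ (Prod.ext ?_ (Prod.ext ?_ (Prod.ext ?_ ?_))) <;> simp only
            · rw [pv_sub_zero_of_le b1 k (by omega), pv_sub_zero_of_le b1 (k+1) (by omega)]; try simp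
            · rw [pv_sub_zero_of_le b2 k (by omega), pv_sub_zero_of_le b2 (k+1) (by omega),
                  pv_sub_zero_of_le b1 k (by omega), pv_sub_zero_of_le b1 (k+1) (by omega)]; try simp
            · rw [pv_sub_zero_of_le b3 k (by omega), pv_sub_zero_of_le b3 (k+1) (by omega),
                  pv_sub_zero_of_le b2 k (by omega), pv_sub_zero_of_le b2 (k+1) (by omega)]; try simp
            · rw [pv_sub_zero_of_le b3 k (by omega), pv_sub_zero_of_le b3 (k+1) (by omega),
                  pv_take_cons_sub x xs b4 k c4]; try simp
            · rw [pv_drop_cons_sub x xs b4 k c4]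
          · have : pvStep n (s1, s2, s3, s4, s5) ((k : Int), x) =
                (s1, s2, s3, s4, s5 ++ [x]) := by
              simp [pvStep,
                show ¬ ((k:Int) * 100 ≤ 10 * n) from fun h => c1 ((h1 k).mp h),
                show ¬ ((k:Int) * 100 ≤ 30 * n) from fun h => c2 ((h2 k).mp h),
                show ¬ ((k:Int) * 100 ≤ 60 * n) from fun h => c3 ((h3 k).mp h),
                show ¬ ((k:Int) * 100 ≤ 85 * n) from fun h => c4 ((h4 k).mp h)]
            rw [this, ih]
            refine Prod.ext ?_ (Prod.ext ?_ (Prod.ext ?_ (Prod.ext ?_ ?_))) <;> simp only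
            · rw [pv_sub_zero_of_le b1 k (by omega), pv_sub_zero_of_le b1 (k+1) (by omega)]; try simp
            · rw [pv_sub_zero_of_le b2 k (by omega), pv_sub_zero_of_le b2 (k+1) (by omega),
                  pv_sub_zero_of_le b1 k (by omega), pv_sub_zero_of_le b1 (k+1) (by omega)]; try simp
            · rw [pv_sub_zero_of_le b3 k (by omega), pv_sub_zero_of_le b3 (k+1) (by omega),
                  pv_sub_zero_of_le b2 k (by omega), pv_sub_zero_of_le b2 (k+1) (by omega)]; try simp
            · rw [pv_sub_zero_of_le b4 k (by omega), pv_sub_zero_of_le b4 (k+1) (by omega),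
                  pv_sub_zero_of_le b3 k (by omega), pv_sub_zero_of_le b3 (k+1) (by omega)]; try simp
            · rw [pv_sub_zero_of_le b4 k (by omega), pv_sub_zero_of_le b4 (k+1) (by omega)]; try simp

-- A's float test at position k holds exactly when k is below B's boundary index
theorem pv_cut_iff (n t : Nat) :
    ∀ k : Nat, ((k : Int) * 100 ≤ (t : Int) * (n : Int)) ↔ k < pvCut n t := by
  intro k
  unfold pvCut
  rw [show (k < t * n / 100 + 1) ↔ (k ≤ t * n / 100) from by omega]
  rw [Nat.le_div_iff_mul_le (by norm_num : 0 < 100)]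
  constructor
  · intro h; exact_mod_cast h
  · intro h; exact_mod_cast h

theorem pv_cut_mono (n t t' : Nat) (h : t ≤ t') : pvCut n t ≤ pvCut n t' := by
  unfold pvCut
  have : t * n ≤ t' * n := Nat.mul_le_mul_right n h
  have := Nat.div_le_div_right (c := 100) this
  omega

-- ===== VERDICT (by name: the statement is the Claim_ definition above) =====
theorem create_ranking_categories_spec : Claim_equal_create_ranking_categories := by
  intro xs _
  unfold Spec_create_ranking_categories
  set n := xs.length with hnn
  have h1 := pv_cut_iff n 10
  have h2 := pv_cut_iff n 30
  have h3 := pv_cut_iff n 60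
  have h4 := pv_cut_iff n 85
  have m12 := pv_cut_mono n 10 30 (by norm_num)
  have m23 := pv_cut_mono n 30 60 (by norm_num)
  have m34 := pv_cut_mono n 60 85 (by norm_num)
  show create_ranking_categories xs = create_ranking_categories_alt xs
  have H := pv_fold_spec n (pvCut n 10) (pvCut n 30) (pvCut n 60) (pvCut n 85)
      (by exact_mod_cast h1) (by exact_mod_cast h2) (by exact_mod_cast h3) (by exact_mod_cast h4)
      m12 m23 m34 xs 0 [] [] [] [] []
  simp only [Nat.cast_zero, Nat.sub_zero, List.nil_append] at H
  simp only [create_ranking_categories, create_ranking_categories_alt, ← hnn, H]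
  simp [List.drop_take]
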